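-- pv_equiv track=rewrite | github.com/Akshay1164/Puzzles | Puzzle/12 Ball Puzzle Solver.py | weigh
-- ===== SOURCE A (Python) =====
-- def weigh(left, right, fake_ball, fake_type):
--     """
--     Simulates a balance weighing.
--     """
--     def weight(ball):
--         if ball == fake_ball:
--             return 99 if fake_type == "light" else 101
--         return 100
--
--     left_weight = sum(weight(b) for b in left)
--     right_weight = sum(weight(b) for b in right)
--
--     if left_weight > right_weight:
--         return "left"
--     elif left_weight < right_weight:
--         return "right"
--     else:
--         return "equal"
-- ===== SOURCE B (Python) =====
-- def weigh(left, right, fake_ball, fake_type):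
--     # Pairwise cancellation: balls placed one-per-pan cancel their nominal 100g,
--     # so paired positions only contribute the +/-1 fake offset; the surplus balls
--     # of the longer pan contribute their full weight. tilt = left - right.
--     delta = -1 if fake_type == "light" else 1
--     tilt = 0
--     for l, r in zip(left, right):
--         tilt = tilt + (delta if l == fake_ball else 0) - (delta if r == fake_ball else 0)
--     n = min(len(left), len(right))
--     for b in left[n:]:
--         tilt = tilt + (100 + (delta if b == fake_ball else 0))
--     for b in right[n:]:
--         tilt = tilt - (100 + (delta if b == fake_ball else 0))
--     if tilt > 0:
--         return "left"
--     elif tilt < 0: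
--         return "right"
--     else:
--         return "equal"
-- ===== Notes on version B (the rewrite author's own statement) =====
-- stated objective: alternative
-- what changed: Instead of summing absolute per-ball weights on each pan, B zips the pans and cancels paired balls' nominal 100g (paired positions contribute only the +/-1 fake offset), adds full weights only for the surplus balls of the longer pan, and returns the sign of the resulting tilt.
import Mathlib
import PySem

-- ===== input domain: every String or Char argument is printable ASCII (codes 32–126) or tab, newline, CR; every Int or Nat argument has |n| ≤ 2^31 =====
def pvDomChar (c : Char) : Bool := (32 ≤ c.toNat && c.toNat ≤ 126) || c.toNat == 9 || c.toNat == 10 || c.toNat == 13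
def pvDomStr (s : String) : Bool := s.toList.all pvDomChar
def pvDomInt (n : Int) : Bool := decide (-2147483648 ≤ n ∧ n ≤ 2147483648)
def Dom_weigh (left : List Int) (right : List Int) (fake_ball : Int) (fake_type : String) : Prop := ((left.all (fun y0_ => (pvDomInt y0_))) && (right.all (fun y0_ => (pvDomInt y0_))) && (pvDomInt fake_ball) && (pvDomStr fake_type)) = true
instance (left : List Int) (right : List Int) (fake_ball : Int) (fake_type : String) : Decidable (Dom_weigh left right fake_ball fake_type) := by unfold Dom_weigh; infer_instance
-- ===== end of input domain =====

-- B replaces A's per-pan absolute weight sums by pairwise cancellation over the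
-- zipped pans (paired balls contribute only the ±1 fake offset, surplus balls
-- their full weight); objective: alternative.

-- ===== PORT A =====
-- inner helper `weight` of A
def weighWeight (fake_ball : Int) (fake_type : String) (ball : Int) : Int :=
  if ball == fake_ball then (if fake_type == "light" then 99 else 101) else 100

def weigh (left : List Int) (right : List Int) (fake_ball : Int) (fake_type : String) : String :=
  let left_weight := (left.map (weighWeight fake_ball fake_type)).sum
  let right_weight := (right.map (weighWeight fake_ball fake_type)).sum
  if left_weight > right_weight then "left"
  else if left_weight < right_weight then "right"
  else "equal"

-- ===== PORT B =====
def weigh_alt (left : List Int) (right : List Int) (fake_ball : Int) (fake_type : String) : String :=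
  let delta : Int := if fake_type == "light" then -1 else 1
  let tilt0 := (left.zip right).foldl
    (fun t p => t + (if p.1 == fake_ball then delta else 0) - (if p.2 == fake_ball then delta else 0)) 0
  let n := min left.length right.length
  let tilt1 := (left.drop n).foldl (fun t b => t + (100 + (if b == fake_ball then delta else 0))) tilt0
  let tilt := (right.drop n).foldl (fun t b => t - (100 + (if b == fake_ball then delta else 0))) tilt1
  if tilt > 0 then "left"
  else if tilt < 0 then "right"
  else "equal"

-- ===== PRECONDITION & SPEC =====
def Spec_weigh (left : List Int) (right : List Int) (fake_ball : Int) (fake_type : String) (out : String) : Prop := out = weigh_alt left right fake_ball fake_type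
instance (left : List Int) (right : List Int) (fake_ball : Int) (fake_type : String) (out : String) : Decidable (Spec_weigh left right fake_ball fake_type out) := by unfold Spec_weigh; infer_instance

-- ===== CLAIM (what is proved, stated in full; the proofs are below) =====
def Claim_equal_weigh : Prop := ∀ (left : List Int) (right : List Int) (fake_ball : Int) (fake_type : String), Dom_weigh left right fake_ball fake_type → Spec_weigh left right fake_ball fake_type (weigh left right fake_ball fake_type)

-- ===== LEMMAS AND PROOFS =====
-- A's weight decomposes into nominal weight plus fake offset
theorem weight_split (fake_ball : Int) (fake_type : String) (b : Int) :
    weighWeight fake_ball fake_type b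
      = 100 + (if b == fake_ball then (if fake_type == "light" then (-1 : Int) else 1) else 0) := by
  unfold weighWeight
  by_cases hb : b == fake_ball <;> by_cases hl : fake_type == "light" <;> simp [hb, hl]

theorem foldl_add_sum (f : Int → Int) (xs : List Int) (init : Int) :
    xs.foldl (fun t b => t + f b) init = init + (xs.map f).sum := by
  induction xs generalizing init with
  | nil => simp
  | cons x xs ih => simp [ih]; ring

theorem foldl_sub_sum (f : Int → Int) (xs : List Int) (init : Int) :
    xs.foldl (fun t b => t - f b) init = init - (xs.map f).sum := by
  induction xs generalizing init with
  | nil => simp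
  | cons x xs ih => simp [ih]; ring

theorem zip_fold_sum (fb delta : Int) (l : List Int) :
    ∀ (r : List Int) (init : Int),
    (l.zip r).foldl
        (fun t p => t + (if p.1 == fb then delta else 0) - (if p.2 == fb then delta else 0)) init
      = init
        + ((l.take (min l.length r.length)).map (fun b => if b == fb then delta else 0)).sum
        - ((r.take (min l.length r.length)).map (fun b => if b == fb then delta else 0)).sum := by
  induction l with
  | nil => intro r init; simp
  | cons a l ih =>
    intro r init
    cases r with
    | nil => simp
    | cons c r =>
      simp only [List.zip_cons_cons, List.foldl_cons, List.length_cons, ih,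
        Nat.succ_min_succ, List.take_succ_cons, List.map_cons, List.sum_cons]
      ring

theorem map_sum_split (f : Int → Int) (xs : List Int) :
    (xs.map (fun b => 100 + f b)).sum = 100 * (xs.length : Int) + (xs.map f).sum := by
  induction xs with
  | nil => simp
  | cons x xs ih => simp [ih]; ring

-- ===== VERDICT (by name: the statement is the Claim_ definition above) =====
theorem weigh_spec : Claim_equal_weigh := by
  intro left right fake_ball fake_type _
  unfold Spec_weigh weigh weigh_alt
  dsimp only
  rw [foldl_sub_sum, foldl_add_sum, zip_fold_sum]
  generalize hmn : min left.length right.length = n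
  have h1 : n ≤ left.length := by omega
  have h2 : n ≤ right.length := by omega
  have e1 : ∀ xs : List Int,
      (xs.map (weighWeight fake_ball fake_type)).sum
        = 100 * (xs.length : Int)
          + (xs.map (fun b => if b == fake_ball then (if fake_type == "light" then (-1 : Int) else 1) else 0)).sum := by
    intro xs
    have : xs.map (weighWeight fake_ball fake_type)
        = xs.map (fun b => 100 + (if b == fake_ball then (if fake_type == "light" then (-1 : Int) else 1) else 0)) := by
      apply List.map_congr_left; intro b _; rw [weight_split]
    rw [this, map_sum_split]
  have e2 : ∀ xs : List Int,
      (xs.map (fun b => if b == fake_ball then (if fake_type == "light" then (-1 : Int) else 1) else 0)).sum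
        = ((xs.take n).map (fun b => if b == fake_ball then (if fake_type == "light" then (-1 : Int) else 1) else 0)).sum
          + ((xs.drop n).map (fun b => if b == fake_ball then (if fake_type == "light" then (-1 : Int) else 1) else 0)).sum := by
    intro xs
    conv_lhs => rw [← List.take_append_drop n xs]
    simp
  have key : (left.map (weighWeight fake_ball fake_type)).sum
        - (right.map (weighWeight fake_ball fake_type)).sum
      = 0
        + ((left.take n).map (fun b => if b == fake_ball then (if fake_type == "light" then (-1 : Int) else 1) else 0)).sum
        - ((right.take n).map (fun b => if b == fake_ball then (if fake_type == "light" then (-1 : Int) else 1) else 0)).sum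
        + ((left.drop n).map (fun b => 100 + (if b == fake_ball then (if fake_type == "light" then (-1 : Int) else 1) else 0))).sum
        - ((right.drop n).map (fun b => 100 + (if b == fake_ball then (if fake_type == "light" then (-1 : Int) else 1) else 0))).sum := by
    rw [e1 left, e1 right, e2 left, e2 right, map_sum_split, map_sum_split,
      List.length_drop, List.length_drop, Nat.cast_sub h1, Nat.cast_sub h2]
    ring
  rw [← key]
  split_ifs <;> first | rfl | omega
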